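-- pv_equiv track=rewrite | github.com/doudoukiss/reachy_mini_conversation_app | references/Blink-AI-dou/src/embodied_stack/desktop/devices/core.py | _extract_whisper_stdout
-- ===== SOURCE A (Python) =====
-- def _extract_whisper_stdout(stdout: str, stderr: str) -> str:
--     lines = [line.strip() for line in (*stdout.splitlines(), *stderr.splitlines()) if line.strip()]
--     candidates = [
--         line
--         for line in lines
--         if not line.startswith("[")
--         and "system_info" not in line
--         and "whisper_" not in line
--         and "main:" not in line
--     ]
--     return candidates[-1] if candidates else ""
-- ===== SOURCE B (Python) =====
-- def _extract_whisper_stdout(stdout: str, stderr: str) -> str: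
--     for line in reversed(stdout.splitlines() + stderr.splitlines()):
--         s = line.strip()
--         if not s:
--             continue
--         if s.startswith("[") or "system_info" in s or "whisper_" in s or "main:" in s:
--             continue
--         return s
--     return ""
-- ===== Notes on version B (the rewrite author's own statement) =====
-- stated objective: simpler
-- what changed: Instead of materialising a cleaned list and a filtered candidates list and taking its last element, B scans the combined lines in reverse and returns the first stripped line that passes the filters (early exit).
import Mathlib
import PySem

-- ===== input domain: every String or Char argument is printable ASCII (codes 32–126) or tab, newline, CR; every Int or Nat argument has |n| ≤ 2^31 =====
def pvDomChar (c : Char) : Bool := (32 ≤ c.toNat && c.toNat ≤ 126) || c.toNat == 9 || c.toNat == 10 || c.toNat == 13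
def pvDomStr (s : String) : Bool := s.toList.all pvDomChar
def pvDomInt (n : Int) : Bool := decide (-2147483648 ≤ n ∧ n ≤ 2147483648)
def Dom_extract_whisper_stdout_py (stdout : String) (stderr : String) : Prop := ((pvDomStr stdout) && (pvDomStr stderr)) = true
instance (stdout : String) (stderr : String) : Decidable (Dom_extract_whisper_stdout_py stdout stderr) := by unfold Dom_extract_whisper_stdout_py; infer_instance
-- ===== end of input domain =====

-- B replaces A's two materialised lists (cleaned lines, then filtered candidates) by a single
-- reverse scan that returns the first qualifying stripped line (early exit); same return value.

-- ===== PORT A =====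
def extract_whisper_stdout_py (stdout : String) (stderr : String) : String :=
  let lines := ((PySem.Str.splitlines stdout) ++ (PySem.Str.splitlines stderr)).filterMap
    (fun line => if PySem.Str.strip line ≠ "" then some (PySem.Str.strip line) else none)
  let candidates := lines.filter (fun line =>
    !(PySem.Str.startswith line "[") && !(PySem.Str.isIn "system_info" line) &&
    !(PySem.Str.isIn "whisper_" line) && !(PySem.Str.isIn "main:" line))
  if candidates = [] then "" else (PySem.List.pyGet? candidates (-1)).getD ""

-- ===== PORT B =====
-- backward early-exit scan over the raw lines
def pvScanBack : List String → String
  | [] => ""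
  | line :: rest =>
    let s := PySem.Str.strip line
    if s = "" then pvScanBack rest
    else if PySem.Str.startswith s "[" || PySem.Str.isIn "system_info" s ||
            PySem.Str.isIn "whisper_" s || PySem.Str.isIn "main:" s then pvScanBack rest
    else s

def extract_whisper_stdout_py_alt (stdout : String) (stderr : String) : String :=
  pvScanBack ((PySem.Str.splitlines stdout ++ PySem.Str.splitlines stderr).reverse)

-- ===== PRECONDITION & SPEC =====
def Spec_extract_whisper_stdout_py (stdout : String) (stderr : String) (out : String) : Prop := out = extract_whisper_stdout_py_alt stdout stderr
instance (stdout : String) (stderr : String) (out : String) : Decidable (Spec_extract_whisper_stdout_py stdout stderr out) := by unfold Spec_extract_whisper_stdout_py; infer_instance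

-- ===== CLAIM (what is proved, stated in full; the proofs are below) =====
def Claim_equal_extract_whisper_stdout_py : Prop := ∀ (stdout : String) (stderr : String), Dom_extract_whisper_stdout_py stdout stderr → Spec_extract_whisper_stdout_py stdout stderr (extract_whisper_stdout_py stdout stderr)

-- ===== LEMMAS AND PROOFS =====

def pvG (line : String) : Option String :=
  if PySem.Str.strip line ≠ "" then some (PySem.Str.strip line) else none

def pvKeep (line : String) : Bool :=
  !(PySem.Str.startswith line "[") && !(PySem.Str.isIn "system_info" line) &&
  !(PySem.Str.isIn "whisper_" line) && !(PySem.Str.isIn "main:" line)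

-- candidates[-1] on a (possibly empty) list, as getLast?
theorem pvLast_eq (l : List String) :
    (if l = [] then "" else (PySem.List.pyGet? l (-1)).getD "") = l.getLast?.getD "" := by
  rcases l with _ | ⟨x, xs⟩
  · simp
  · simp only [if_neg (List.cons_ne_nil x xs)]
    have h : PySem.List.pyGet? (x :: xs) (-1) = (x :: xs).getLast? := by
      simp [PySem.List.pyGet?, PySem.List.pyIdx?, List.getLast?_eq_getElem?]
    rw [h]

-- B's scan computes the head of the filtered/stripped list
theorem pvScanBack_eq (M : List String) :
    pvScanBack M = ((M.filterMap pvG).filter pvKeep).head?.getD "" := by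
  induction M with
  | nil => rfl
  | cons line rest ih =>
    simp only [pvScanBack]
    by_cases hs : PySem.Str.strip line = ""
    · have hg : pvG line = none := by
        rw [pvG, if_neg]; exact fun h => h hs
      rw [if_pos hs]
      simp only [List.filterMap_cons, hg]
      exact ih
    · have hg : pvG line = some (PySem.Str.strip line) := by rw [pvG, if_pos hs]
      have hkc : pvKeep (PySem.Str.strip line)
          = !(PySem.Str.startswith (PySem.Str.strip line) "[" ||
              PySem.Str.isIn "system_info" (PySem.Str.strip line) ||
              PySem.Str.isIn "whisper_" (PySem.Str.strip line) ||
              PySem.Str.isIn "main:" (PySem.Str.strip line)) := by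
        unfold pvKeep
        cases PySem.Str.startswith (PySem.Str.strip line) "[" <;>
          cases PySem.Str.isIn "system_info" (PySem.Str.strip line) <;>
          cases PySem.Str.isIn "whisper_" (PySem.Str.strip line) <;>
          cases PySem.Str.isIn "main:" (PySem.Str.strip line) <;> rfl
      rw [if_neg hs]
      by_cases hc : (PySem.Str.startswith (PySem.Str.strip line) "[" ||
              PySem.Str.isIn "system_info" (PySem.Str.strip line) ||
              PySem.Str.isIn "whisper_" (PySem.Str.strip line) ||
              PySem.Str.isIn "main:" (PySem.Str.strip line)) = true
      · have hkf : pvKeep (PySem.Str.strip line) = false := by rw [hkc, hc]; rfl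
        rw [if_pos hc]
        simp only [List.filterMap_cons, hg, List.filter_cons, hkf, Bool.false_eq_true,
          if_false]
        exact ih
      · have hcf := Bool.eq_false_iff.mpr hc
        have hkt : pvKeep (PySem.Str.strip line) = true := by rw [hkc, hcf]; rfl
        rw [if_neg hc]
        simp only [List.filterMap_cons, hg, List.filter_cons, hkt, if_true]
        rfl

-- ===== VERDICT (by name: the statement is the Claim_ definition above) =====
theorem extract_whisper_stdout_py_spec : Claim_equal_extract_whisper_stdout_py := by
  intro stdout stderr _
  unfold Spec_extract_whisper_stdout_py extract_whisper_stdout_py extract_whisper_stdout_py_alt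
  rw [pvScanBack_eq]
  have h1 : (fun line => if PySem.Str.strip line ≠ "" then some (PySem.Str.strip line) else none) = pvG := rfl
  have h2 : (fun line => !(PySem.Str.startswith line "[") && !(PySem.Str.isIn "system_info" line) &&
      !(PySem.Str.isIn "whisper_" line) && !(PySem.Str.isIn "main:" line)) = pvKeep := rfl
  simp only [h1, h2, pvLast_eq, ← List.head?_reverse, List.filter_reverse, List.filterMap_reverse]
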